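-- pv_equiv track=rewrite | github.com/dudamarlena/pyc_source | pycfiles/EMeRGE-1.4a0-py3.7/pyWriter.cpython-37.py | __ModifyName
-- ===== SOURCE A (Python) =====
-- def __ModifyName(Name):
--     InvalidChars = [
--      ' ', ',', '.']
--     for InvChar in InvalidChars:
--         if InvChar in Name:
--             Name = Name.replace(InvChar, '-')
--
--     Name = Name.lower()
--     return Name
-- ===== SOURCE B (Python) =====
-- def __ModifyName(Name):
--     invalid = {' ', ',', '.'}
--     return ''.join('-' if c in invalid else c for c in Name).lower()
-- ===== Notes on version B (the rewrite author's own statement) =====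
-- stated objective: simpler
-- what changed: Replaces the three guarded full-string .replace scans with a single character-by-character pass using a set membership test, lowering at the end.
import Mathlib
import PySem

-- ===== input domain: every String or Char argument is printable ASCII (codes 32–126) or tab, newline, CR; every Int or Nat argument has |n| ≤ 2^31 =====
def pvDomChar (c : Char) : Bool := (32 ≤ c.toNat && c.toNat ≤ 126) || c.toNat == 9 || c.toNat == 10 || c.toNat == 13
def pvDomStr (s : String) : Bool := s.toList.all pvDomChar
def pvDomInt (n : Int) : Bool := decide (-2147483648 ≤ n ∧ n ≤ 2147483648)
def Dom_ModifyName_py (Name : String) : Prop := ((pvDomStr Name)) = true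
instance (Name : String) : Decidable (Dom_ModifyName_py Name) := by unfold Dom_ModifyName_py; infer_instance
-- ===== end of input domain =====

-- B replaces A's three guarded full-string .replace scans with one character-by-character
-- pass using a set membership test (objective: simpler); return values agree everywhere.

-- ===== PORT A =====
def ModifyName_py (Name : String) : String :=
  let invalidChars : List String := [" ", ",", "."]
  let name := invalidChars.foldl
    (fun n invChar => if PySem.Str.isIn invChar n then PySem.Str.replace n invChar "-" else n)
    Name
  PySem.Str.lower name

-- ===== PORT B =====
def ModifyName_py_alt (Name : String) : String :=
  let invalid : PySem.Set Char := PySem.Set.ofList [' ', ',', '.']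
  PySem.Str.lower (String.ofList (Name.toList.map (fun c => if invalid.contains c then '-' else c)))

-- ===== PRECONDITION & SPEC =====
def Spec_ModifyName_py (Name : String) (out : String) : Prop := out = ModifyName_py_alt Name
instance (Name : String) (out : String) : Decidable (Spec_ModifyName_py Name out) := by unfold Spec_ModifyName_py; infer_instance

-- ===== CLAIM (what is proved, stated in full; the proofs are below) =====
def Claim_equal_ModifyName_py : Prop := ∀ (Name : String), Dom_ModifyName_py Name → Spec_ModifyName_py Name (ModifyName_py Name)

-- ===== LEMMAS AND PROOFS =====

-- replace.go with a single-character pattern maps the substitution over the list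
theorem replace_go_single (a b : Char) :
    ∀ (l acc : List Char) (fuel : Nat), l.length ≤ fuel →
      PySem.Chars.replace.go [a] [b] fuel l acc =
        acc.reverse ++ l.map (fun c => if c = a then b else c) := by
  intro l
  induction l with
  | nil =>
      intro acc fuel _
      cases fuel <;> simp [PySem.Chars.replace.go]
  | cons c t ih =>
      intro acc fuel hfuel
      cases fuel with
      | zero => simp at hfuel
      | succ n =>
          simp only [PySem.Chars.replace.go]
          by_cases h : c = a
          · subst h
            simp only [List.isPrefixOf, BEq.rfl, Bool.true_and,
              if_pos, List.length_singleton, List.drop_succ_cons, List.drop_zero]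
            rw [ih (List.reverse [b] ++ acc) n (by simpa using hfuel)]
            simp
          · have hne : ([a].isPrefixOf (c :: t)) = false := by
              simp [List.isPrefixOf]
              exact fun hq => absurd hq.symm h
            rw [hne]
            simp only [Bool.false_eq_true, if_false]
            rw [ih (c :: acc) n (by simpa using hfuel)]
            simp [h]

theorem replace_single (a b : Char) (cs : List Char) :
    PySem.Chars.replace cs [a] [b] = cs.map (fun c => if c = a then b else c) := by
  rw [PySem.Chars.replace]
  simp only [List.isEmpty_cons, Bool.false_eq_true, if_false]
  rw [replace_go_single a b cs [] cs.length le_rfl]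
  simp

theorem map_id_of_not_mem (a b : Char) (cs : List Char) (h : a ∉ cs) :
    cs.map (fun c => if c = a then b else c) = cs := by
  have : cs.map (fun c => if c = a then b else c) = cs.map id := by
    apply List.map_congr_left
    intro x hx
    have : x ≠ a := fun hxa => h (hxa ▸ hx)
    simp [this]
  rw [this, List.map_id]

-- one guarded replace step of A equals an unconditional map of the substitution
theorem step_eq (a : Char) (n : String) :
    (if PySem.Str.isIn (String.ofList [a]) n then PySem.Str.replace n (String.ofList [a]) "-" else n)
      = String.ofList (n.toList.map (fun c => if c = a then '-' else c)) := by
  by_cases h : PySem.Str.isIn (String.ofList [a]) n = true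
  · rw [if_pos h]
    apply String.ext
    rw [PySem.Str.toList_replace]
    simp only [String.toList_ofList]
    have hd : ("-" : String).toList = ['-'] := rfl
    rw [hd, replace_single a '-' n.toList]
  · rw [if_neg h]
    have hmem : a ∉ n.toList := by
      intro hmem
      apply h
      rw [PySem.Str.isIn_eq]
      rw [PySem.Chars.isIn_iff_infix]
      simp only [String.toList_ofList]
      rcases List.mem_iff_append.mp hmem with ⟨s, t, hst⟩
      exact ⟨s, t, by simp [hst]⟩
    apply String.ext
    rw [map_id_of_not_mem a '-' n.toList hmem]
    simp

-- ===== VERDICT (by name: the statement is the Claim_ definition above) =====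
theorem ModifyName_py_spec : Claim_equal_ModifyName_py := by
  intro Name _
  unfold Spec_ModifyName_py ModifyName_py ModifyName_py_alt
  simp only [List.foldl]
  have h1 := step_eq ' ' Name
  have h2 := step_eq ','
  have h3 := step_eq '.'
  -- the three literal strings are ofList of singletons
  have e1 : (" " : String) = String.ofList [' '] := rfl
  have e2 : ("," : String) = String.ofList [','] := rfl
  have e3 : ("." : String) = String.ofList ['.'] := rfl
  rw [e1, e2, e3, h1, h2 _, h3 _]
  apply String.ext
  simp only [PySem.Str.toList_lower, String.toList_ofList, List.map_map]
  congr 1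
  apply List.map_congr_left
  intro c _
  by_cases hs : c = ' ' <;> by_cases hc : c = ',' <;> by_cases hd : c = '.' <;>
    simp_all [PySem.Set.contains, PySem.Set.ofList, Function.comp]
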